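-- pv_equiv track=rewrite | github.com/ndenStanford/ml-mesh | libs/models/onclusiveml/models/visitor_estimation/utils.py | max_options
-- ===== SOURCE A (Python) =====
-- def max_options(rows):
--     """Return the maximum values from each column across multiple rows.
--
--     Args:
--         rows (list): List of rows, where each row is a list containing values for multiple columns.
--
--     Returns:
--         list: A list of maximum values for each column.
--     """
--     # Transpose the rows to get columns
--     columns = zip(*rows)
--
--     result = []
--     for column in columns:
--         # Filter out None values explicitly
--         filtered = [value for value in column if value is not None]
--         # If there are valid values, take the max; otherwise, keep None
--         max_value = max(filtered) if filtered else None
--         result.append(max_value)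
--
--     return result
-- ===== SOURCE B (Python) =====
-- def max_options(rows):
--     """Column-wise max ignoring None, kept as a running per-column maximum (no transpose)."""
--     if not rows:
--         return []
--     result = [None] * min(len(row) for row in rows)
--     for row in rows:
--         result = [a if v is None else v if a is None else max(a, v)
--                   for a, v in zip(result, row)]
--     return result
-- ===== Notes on version B (the rewrite author's own statement) =====
-- stated objective: alternative
-- what changed: B replaces the transpose-then-reduce (zip(*rows), then max of each filtered column) by a single row-major pass that maintains a running per-column maximum merged row by row.
import Mathlib
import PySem

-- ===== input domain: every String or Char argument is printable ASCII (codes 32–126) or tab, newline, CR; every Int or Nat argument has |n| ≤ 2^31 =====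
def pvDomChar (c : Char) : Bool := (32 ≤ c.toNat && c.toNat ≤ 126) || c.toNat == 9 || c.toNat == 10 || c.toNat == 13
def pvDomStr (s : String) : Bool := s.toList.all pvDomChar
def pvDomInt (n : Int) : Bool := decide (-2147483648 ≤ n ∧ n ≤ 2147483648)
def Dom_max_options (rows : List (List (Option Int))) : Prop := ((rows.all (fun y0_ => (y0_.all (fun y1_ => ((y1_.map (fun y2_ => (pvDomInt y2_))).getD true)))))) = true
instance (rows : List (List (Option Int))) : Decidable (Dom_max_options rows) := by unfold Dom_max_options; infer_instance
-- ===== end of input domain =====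

-- B replaces A's transpose-then-reduce by one row-major pass keeping a running per-column maximum; same cost, different traversal.


-- ===== PORT A =====
-- zip(*rows) is ported exactly: the column count is the minimum row length (0 for no rows),
-- and column j collects rows[i][j]; for j below every row's length List.getD j reads that element.
def max_options (rows : List (List (Option Int))) : List (Option Int) :=
  let n : Nat := match rows with
    | [] => 0
    | r :: rs => rs.foldl (fun m q => min m q.length) r.length
  let columns : List (List (Option Int)) :=
    (List.range n).map (fun j => rows.map (fun q => q.getD j none))
  columns.foldl (fun result column =>
    let filtered : List Int := column.filterMap id
    let maxValue : Option Int := filtered.max?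
    result ++ [maxValue]) []

-- ===== PORT B =====
-- merge of the running column maximum with one cell: 'a if v is None else v if a is None else max(a, v)'
def mergeOpt (a v : Option Int) : Option Int :=
  match v with
  | none => a
  | some w =>
    match a with
    | none => some w
    | some x => some (max x w)

def max_options_alt (rows : List (List (Option Int))) : List (Option Int) :=
  match rows with
  | [] => []
  | r :: rs =>
    let n : Nat := (rs.map List.length).foldl min r.length
    (r :: rs).foldl (fun acc row => List.zipWith mergeOpt acc row) (List.replicate n none)

-- ===== PRECONDITION & SPEC =====
def Spec_max_options (rows : List (List (Option Int))) (out : List (Option Int)) : Prop := out = max_options_alt rows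
instance (rows : List (List (Option Int))) (out : List (Option Int)) : Decidable (Spec_max_options rows out) := by unfold Spec_max_options; infer_instance

-- ===== CLAIM (what is proved, stated in full; the proofs are below) =====
def Claim_equal_max_options : Prop := ∀ (rows : List (List (Option Int))), Dom_max_options rows → Spec_max_options rows (max_options rows)

-- ===== LEMMAS AND PROOFS =====

-- the min-length fold is a lower bound on the seed and on every row's length
theorem foldl_min_le_init (rs : List (List (Option Int))) (a : Nat) :
    rs.foldl (fun m q => min m q.length) a ≤ a := by
  induction rs generalizing a with
  | nil => simp
  | cons r rs ih => exact le_trans (ih _) (Nat.min_le_left _ _)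

theorem foldl_min_le_mem (rs : List (List (Option Int))) (a : Nat)
    (q : List (Option Int)) (hq : q ∈ rs) :
    rs.foldl (fun m q => min m q.length) a ≤ q.length := by
  induction rs generalizing a with
  | nil => cases hq
  | cons r rs ih =>
    simp only [List.foldl_cons]
    rcases List.mem_cons.mp hq with rfl | h
    · exact le_trans (foldl_min_le_init rs _) (Nat.min_le_right _ _)
    · exact ih _ h

-- folding mergeOpt from a running value 'some v' is the max over the remaining non-None cells
theorem foldl_merge_some (col : List (Option Int)) (v : Int) :
    col.foldl mergeOpt (some v) = some ((col.filterMap id).foldl max v) := by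
  induction col generalizing v with
  | nil => rfl
  | cons c col ih =>
    cases c with
    | none => simpa [mergeOpt] using ih v
    | some w => simpa [mergeOpt] using ih (max v w)

-- folding mergeOpt from none computes max? of the filtered column
theorem foldl_merge_none (col : List (Option Int)) :
    col.foldl mergeOpt none = (col.filterMap id).max? := by
  induction col with
  | nil => rfl
  | cons c col ih =>
    cases c with
    | none => simpa [mergeOpt] using ih
    | some w => simp [mergeOpt, foldl_merge_some, List.max?]

-- row-major zipWith fold = per-column fold (the heart of the equivalence)
theorem fold_rows (rows : List (List (Option Int))) (acc : List (Option Int))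
    (h : ∀ q ∈ rows, acc.length ≤ q.length) :
    rows.foldl (fun a row => List.zipWith mergeOpt a row) acc =
      (List.range acc.length).map
        (fun j => rows.foldl (fun a row => mergeOpt a (row.getD j none)) (acc.getD j none)) := by
  induction rows generalizing acc with
  | nil =>
    simp only [List.foldl_nil]
    apply List.ext_getElem
    · simp
    · intro i h1 h2
      simp only [List.getElem_map, List.getElem_range]
      exact (List.getD_eq_getElem _ _ h1).symm
  | cons row rest ih =>
    have hrow : acc.length ≤ row.length := h row (by simp)
    have hlen : (List.zipWith mergeOpt acc row).length = acc.length := by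
      simp [List.length_zipWith]; omega
    have hrest : ∀ q ∈ rest, (List.zipWith mergeOpt acc row).length ≤ q.length := by
      intro q hq; rw [hlen]; exact h q (by simp [hq])
    rw [List.foldl_cons, ih _ hrest, hlen]
    apply List.map_congr_left
    intro j hj
    have hj' : j < acc.length := List.mem_range.mp hj
    have h1 : (List.zipWith mergeOpt acc row).getD j none =
        mergeOpt (acc.getD j none) (row.getD j none) := by
      have hz : j < (List.zipWith mergeOpt acc row).length := by rw [hlen]; exact hj'
      rw [List.getD_eq_getElem _ _ hz, List.getD_eq_getElem _ _ hj',
        List.getD_eq_getElem _ _ (lt_of_lt_of_le hj' hrow), List.getElem_zipWith]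
    rw [h1, List.foldl_cons]

theorem getD_replicate_none (n j : Nat) :
    (List.replicate n (none : Option Int)).getD j none = none := by
  by_cases hj : j < n
  · rw [List.getD_eq_getElem _ _ (by simpa using hj)]; simp
  · rw [List.getD_eq_default]; simpa using hj

-- ===== VERDICT (by name: the statement is the Claim_ definition above) =====
theorem max_options_spec : Claim_equal_max_options := by
  intro rows _
  unfold Spec_max_options max_options max_options_alt
  cases rows with
  | nil => rfl
  | cons r rs =>
    simp only [List.foldl_map]
    set n : Nat := rs.foldl (fun m q => min m q.length) r.length with hn
    have hmin : ∀ q ∈ r :: rs, n ≤ q.length := by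
      intro q hq
      rcases List.mem_cons.mp hq with rfl | h
      · exact le_trans (foldl_min_le_init rs q.length) le_rfl
      · exact foldl_min_le_mem rs r.length q h
    have hmin' : ∀ q ∈ r :: rs, (List.replicate n (none : Option Int)).length ≤ q.length := by
      simpa using hmin
    rw [fold_rows _ _ hmin']
    rw [PySem.List.foldl_append_singleton_eq_map]
    simp only [List.nil_append, List.length_replicate]
    apply List.map_congr_left
    intro j _
    rw [getD_replicate_none,
      ← List.foldl_map (f := fun q : List (Option Int) => q.getD j none) (g := mergeOpt),
      foldl_merge_none]
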